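-- pv_equiv track=rewrite | github.com/mvgarcia/Trabajos-2018 | Anillos residuales.py | multipl
-- ===== SOURCE A (Python) =====
-- def multipl(n):
--     matriz=[]
--     for i in range (n):
--         fila=[]
--         for j in range (n):
--             fila.append((i*j)%n)
--             if(j==n-1):
--                 matriz.append(fila)
--     return matriz
-- ===== SOURCE B (Python) =====
-- def multipl(n):
--     base = list(range(n))
--     row = [0] * n
--     matriz = []
--     for _ in range(n):
--         matriz.append(row)
--         row = [(r + b) % n for r, b in zip(row, base)]
--     return matriz
-- ===== Notes on version B (the rewrite author's own statement) =====
-- stated objective: alternative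
-- what changed: B builds the table incrementally: it keeps one running row (row of i) and obtains the next row by elementwise (row[j]+j)%n, replacing A's per-cell multiplication (i*j)%n and A's append-on-last-j control flow.
import Mathlib
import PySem

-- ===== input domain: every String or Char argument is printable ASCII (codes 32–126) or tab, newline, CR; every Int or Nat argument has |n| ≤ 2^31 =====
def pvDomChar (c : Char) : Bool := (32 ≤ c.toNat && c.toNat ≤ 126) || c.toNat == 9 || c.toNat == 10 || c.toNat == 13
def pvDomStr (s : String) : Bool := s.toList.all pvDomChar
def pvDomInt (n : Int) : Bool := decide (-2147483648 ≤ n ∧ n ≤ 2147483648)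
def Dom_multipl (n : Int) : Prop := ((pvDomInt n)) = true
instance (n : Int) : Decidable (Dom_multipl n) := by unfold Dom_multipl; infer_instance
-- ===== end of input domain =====

-- B keeps a running row updated by elementwise addition mod n instead of computing (i*j)%n per cell (alternative decomposition, same asymptotic cost).

-- ===== PORT A =====
-- inner-loop body of A: append (i*j)%n to fila; when j == n-1, append fila to matriz
def multiplStepA (n i : Int) (st : List Int × List (List Int)) (j : Int) :
    List Int × List (List Int) :=
  let fila := st.1 ++ [PySem.Int.mod (i * j) n]
  (fila, if j == n - 1 then st.2 ++ [fila] else st.2)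

def multipl (n : Int) : List (List Int) :=
  (PySem.List.pyRange 0 n 1).foldl
    (fun matriz i => ((PySem.List.pyRange 0 n 1).foldl (multiplStepA n i) ([], matriz)).2)
    []

-- ===== PORT B =====
-- loop body of B: append the current row, then update it elementwise by (r+b)%n
def multiplStepB (n : Int) (base : List Int) (st : List (List Int) × List Int) (_ : Int) :
    List (List Int) × List Int :=
  (st.1 ++ [st.2], (st.2.zip base).map (fun rb => PySem.Int.mod (rb.1 + rb.2) n))

def multipl_alt (n : Int) : List (List Int) :=
  let base := PySem.List.pyRange 0 n 1
  let row : List Int := List.replicate n.toNat 0   -- [0]*n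
  ((PySem.List.pyRange 0 n 1).foldl (multiplStepB n base) ([], row)).1

-- ===== PRECONDITION & SPEC =====
def Spec_multipl (n : Int) (out : List (List Int)) : Prop := out = multipl_alt n
instance (n : Int) (out : List (List Int)) : Decidable (Spec_multipl n out) := by unfold Spec_multipl; infer_instance

-- ===== CLAIM (what is proved, stated in full; the proofs are below) =====
def Claim_equal_multipl : Prop := ∀ (n : Int), Dom_multipl n → Spec_multipl n (multipl n)

-- ===== LEMMAS AND PROOFS =====

-- the row of index i in the common specification matrix
def pvRow (n i : Int) : List Int :=
  (PySem.List.pyRange 0 n 1).map (fun j => PySem.Int.mod (i * j) n)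

-- the full specification matrix
def pvMat (n : Int) : List (List Int) :=
  (PySem.List.pyRange 0 n 1).map (pvRow n)

-- A's inner loop over pyRange a n 1 (with a < n) appends the mapped tail to fila
-- and pushes the completed row exactly once, at j = n-1.
theorem pvInnerA (n i : Int) :
    ∀ (k : Nat) (a : Int) (fila : List Int) (matriz : List (List Int)),
      (n - a).toNat = k → a < n →
      (PySem.List.pyRange a n 1).foldl (multiplStepA n i) (fila, matriz) =
        (fila ++ (PySem.List.pyRange a n 1).map (fun j => PySem.Int.mod (i * j) n),
         matriz ++ [fila ++ (PySem.List.pyRange a n 1).map (fun j => PySem.Int.mod (i * j) n)]) := by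
  intro k
  induction k with
  | zero => intro a fila matriz hk ha; omega
  | succ m ih =>
    intro a fila matriz hk ha
    rw [PySem.List.pyRange_one_cons ha]
    by_cases hlast : a = n - 1
    · have hnil : PySem.List.pyRange (a + 1) n 1 = [] :=
        PySem.List.pyRange_one_eq_nil (by omega)
      simp [multiplStepA, hnil, hlast]
    · have ha' : a + 1 < n := by omega
      rw [List.foldl_cons]
      have h2 := ih (a + 1) (fila ++ [PySem.Int.mod (i * a) n]) matriz (by omega) ha'
      simp only [multiplStepA] at h2 ⊢
      rw [if_neg (by simp; omega)]
      rw [h2]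
      simp

-- foldl with a pointwise-equal step function is the same
theorem pvFoldlCongr {α β : Type} (f g : β → α → β) (h : ∀ b a, f b a = g b a) :
    ∀ (l : List α) (init : β), l.foldl f init = l.foldl g init := by
  intro l
  induction l with
  | nil => intro init; rfl
  | cons x l ih => intro init; rw [List.foldl_cons, List.foldl_cons, h, ih]

-- folding "append one row" over a list is mapping
theorem pvFoldAppend {α β : Type} (g : α → β) :
    ∀ (l : List α) (init : List β),
      l.foldl (fun acc x => acc ++ [g x]) init = init ++ l.map g := by
  intro l
  induction l with
  | nil => simp
  | cons x l ih => intro init; simp [ih]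

theorem pvA_eq (n : Int) : multipl n = pvMat n := by
  by_cases hn : n ≤ 0
  · simp [multipl, pvMat, PySem.List.pyRange_one_eq_nil hn]
  · push_neg at hn
    unfold multipl pvMat
    have hrow : ∀ (matriz : List (List Int)) (i : Int),
        ((PySem.List.pyRange 0 n 1).foldl (multiplStepA n i) ([], matriz)).2
          = matriz ++ [pvRow n i] := by
      intro matriz i
      rw [pvInnerA n i (n - 0).toNat 0 [] matriz rfl (by omega)]
      simp [pvRow]
    rw [pvFoldlCongr _ (fun matriz i => matriz ++ [pvRow n i]) hrow]
    rw [pvFoldAppend (pvRow n) (PySem.List.pyRange 0 n 1) []]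
    simp

-- zipping a mapped list with the original pairs each element with its image
theorem pvZipMapLeft {α β : Type} (f : α → β) :
    ∀ (l : List α), (l.map f).zip l = l.map (fun x => (f x, x)) := by
  intro l
  induction l with
  | nil => rfl
  | cons x l ih => simp [ih]

-- one B update step turns the row of i into the row of i+1
theorem pvStepRow (n i : Int) (hn : 0 < n) :
    ((pvRow n i).zip (PySem.List.pyRange 0 n 1)).map
        (fun rb => PySem.Int.mod (rb.1 + rb.2) n) = pvRow n (i + 1) := by
  unfold pvRow
  rw [pvZipMapLeft]
  simp only [List.map_map]
  apply List.map_congr_left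
  intro j _
  simp only [Function.comp_apply]
  simp only [PySem.Int.mod_eq_emod_of_pos hn]
  rw [Int.emod_add_emod]
  ring_nf

-- B's loop invariant: starting from the row of i, folding over any list appends
-- the successive rows.
theorem pvInnerB (n : Int) (hn : 0 < n) :
    ∀ (l : List Int) (acc : List (List Int)) (i : Int),
      (l.foldl (multiplStepB n (PySem.List.pyRange 0 n 1)) (acc, pvRow n i)).1 =
        acc ++ (List.range l.length).map (fun k : Nat => pvRow n (i + (k : Int))) := by
  intro l
  induction l with
  | nil => simp
  | cons x l ih =>
    intro acc i
    rw [List.foldl_cons]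
    show ((l.foldl (multiplStepB n (PySem.List.pyRange 0 n 1))
        (acc ++ [pvRow n i],
         ((pvRow n i).zip (PySem.List.pyRange 0 n 1)).map
           (fun rb => PySem.Int.mod (rb.1 + rb.2) n)))).1 = _
    rw [pvStepRow n i hn, ih (acc ++ [pvRow n i]) (i + 1)]
    rw [List.length_cons, List.range_succ_eq_map, List.map_cons, List.map_map]
    rw [List.append_assoc, List.singleton_append]
    have hmap : List.map ((fun k : Nat => pvRow n (i + (k : Int))) ∘ Nat.succ) (List.range l.length)
        = List.map (fun k : Nat => pvRow n (i + 1 + (k : Int))) (List.range l.length) := by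
      apply List.map_congr_left
      intro k _
      simp only [Function.comp_apply, Nat.succ_eq_add_one]
      congr 1
      push_cast
      ring
    rw [hmap]
    norm_num

theorem pvRow_zero (n : Int) (hn : 0 < n) :
    pvRow n 0 = List.replicate n.toNat 0 := by
  unfold pvRow
  have hc : ∀ j ∈ PySem.List.pyRange 0 n 1,
      PySem.Int.mod (0 * j) n = (fun _ : Int => (0 : Int)) j := by
    intro j _
    rw [PySem.Int.mod_eq_emod_of_pos hn]; simp
  rw [List.map_congr_left hc, List.map_const']
  rw [PySem.List.length_pyRange_one]
  congr 1
  omega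

theorem pvB_eq (n : Int) : multipl_alt n = pvMat n := by
  by_cases hn : n ≤ 0
  · simp [multipl_alt, pvMat, PySem.List.pyRange_one_eq_nil hn]
  · push_neg at hn
    unfold multipl_alt pvMat
    rw [← pvRow_zero n hn]
    rw [pvInnerB n hn (PySem.List.pyRange 0 n 1) [] 0]
    rw [PySem.List.pyRange_one]
    simp

-- ===== VERDICT (by name: the statement is the Claim_ definition above) =====
theorem multipl_spec : Claim_equal_multipl := by
  intro n _
  unfold Spec_multipl
  rw [pvA_eq, pvB_eq]
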